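-- pv_equiv track=rewrite | github.com/tcoard/attention_go_data_prep | deep_to_attention.py | count_go_terms
-- ===== SOURCE A (Python) =====
-- from itertools import chain, groupby
-- from collections import Counter, defaultdict
--
-- MIN_GO = 50
--
-- def count_go_terms(
--     seq_annos: list[list[str]], go_term_namespace: dict[str, str]
-- ) -> tuple[dict[str, list[str]], list[str]]:
--     """make a dictionary of {namespace: [list of go ids in that namespace]}"""
--     # count how many times the GO ID appears
--     go_id_counts = Counter(chain.from_iterable(seq_annos))
--     # Filter out GO IDs that appear < MIN_GO times
--     filtered_go_ids = dict(filter(lambda tup: tup[1] >= MIN_GO, go_id_counts.items())).keys()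
--     # Sort GO IDs by namespace
--     sorted_go_ids = sorted(filtered_go_ids, key=lambda value: go_term_namespace[value])
--     # Create a new list for each namespace
--     grouped_go_ids = groupby(sorted_go_ids, key=lambda value: go_term_namespace[value])
--     # Create a dict of namespace to list of GO IDs
--     final_go_ids = {k: sorted(list(v)) for k, v in grouped_go_ids}
--     return final_go_ids, sorted_go_ids
-- ===== SOURCE B (Python) =====
-- MIN_GO = 50
--
-- def count_go_terms(seq_annos, go_term_namespace):
--     """make a dictionary of {namespace: [list of go ids in that namespace]}"""
--     # one pass: count occurrences of each GO id (first-occurrence order)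
--     counts = {}
--     for anno in seq_annos:
--         for go_id in anno:
--             counts[go_id] = counts.get(go_id, 0) + 1
--     # index the frequent ids by namespace, keeping first-appearance order per group
--     grouped = {}
--     for go_id, n in counts.items():
--         if n >= MIN_GO:
--             ns = go_term_namespace[go_id]
--             grouped[ns] = grouped.get(ns, []) + [go_id]
--     # emit namespaces alphabetically: concatenation reproduces the stable sort
--     namespaces = sorted(grouped)
--     sorted_go_ids = [g for ns in namespaces for g in grouped[ns]]
--     final_go_ids = {ns: sorted(grouped[ns]) for ns in namespaces}
--     return final_go_ids, sorted_go_ids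
-- ===== Notes on version B (the rewrite author's own statement) =====
-- stated objective: alternative
-- what changed: B replaces A's Counter + sort-of-all-ids-by-namespace + itertools.groupby pipeline with a hand-rolled counting dict and a grouping dict built in one pass over the counts, then emits the namespaces in sorted order and concatenates their first-appearance groups to reproduce the stable sort.
import Mathlib
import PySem

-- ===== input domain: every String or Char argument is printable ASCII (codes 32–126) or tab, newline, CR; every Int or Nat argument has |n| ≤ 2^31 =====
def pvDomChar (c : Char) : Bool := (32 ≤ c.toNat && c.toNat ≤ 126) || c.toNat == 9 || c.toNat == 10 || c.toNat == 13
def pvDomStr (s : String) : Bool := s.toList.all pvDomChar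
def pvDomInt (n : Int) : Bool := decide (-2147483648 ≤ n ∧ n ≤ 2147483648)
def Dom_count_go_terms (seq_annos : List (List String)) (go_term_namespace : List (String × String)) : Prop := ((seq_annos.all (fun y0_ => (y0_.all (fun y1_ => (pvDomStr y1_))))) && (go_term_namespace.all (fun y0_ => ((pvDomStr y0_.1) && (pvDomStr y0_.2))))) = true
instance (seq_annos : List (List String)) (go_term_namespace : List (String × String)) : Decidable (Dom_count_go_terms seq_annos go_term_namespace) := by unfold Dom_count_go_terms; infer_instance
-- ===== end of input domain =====

-- B re-implements the same exact result by grouping the frequent GO ids per namespace in one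
-- pass and concatenating the groups in sorted-namespace order, instead of A's sort-then-groupby
-- (objective: alternative decomposition; equal asymptotic cost on these inputs).

def pvMIN_GO : Int := 50

-- go_term_namespace[v]: first-match lookup in the association list (total via getD "";
-- inputs where Python raises KeyError are excluded by Pre_count_go_terms)
def pvNs (gtn : List (String × String)) (v : String) : String :=
  (((gtn.find? (fun p => p.1 == v)).map (fun p => p.2)).getD "")

-- ===== PORT A =====
-- itertools.groupby consumed into (key, full adjacent group) pairs
def pvGroupby (key : String → String) : List String → List (String × List String)
  | [] => []
  | x :: xs =>
    (key x, x :: xs.takeWhile (fun y => key y == key x)) ::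
      pvGroupby key (xs.dropWhile (fun y => key y == key x))
  termination_by l => l.length
  decreasing_by
    simp only [List.length_cons]
    exact Nat.lt_succ_of_le ((List.dropWhile_sublist _).length_le)

def count_go_terms (seq_annos : List (List String)) (go_term_namespace : List (String × String)) : (List (String × List String)) × List String :=
  let go_id_counts := PySem.Dict.counter seq_annos.flatten
  let filtered_go_ids := (PySem.Dict.ofList (go_id_counts.items.filter (fun t => decide (t.2 ≥ pvMIN_GO)))).keys
  let sorted_go_ids := PySem.List.sorted filtered_go_ids (fun v => pvNs go_term_namespace v)
  let grouped_go_ids := pvGroupby (fun v => pvNs go_term_namespace v) sorted_go_ids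
  let final_go_ids := PySem.Dict.ofList (grouped_go_ids.map (fun p => (p.1, PySem.List.sorted p.2 (fun x => x))))
  (final_go_ids.items, sorted_go_ids)

-- ===== PORT B =====
def count_go_terms_alt (seq_annos : List (List String)) (go_term_namespace : List (String × String)) : (List (String × List String)) × List String :=
  let counts := seq_annos.foldl (fun d anno => anno.foldl (fun (d : PySem.Dict String Int) x => d.insert x (d.getD x 0 + 1)) d) PySem.Dict.empty
  let grouped := counts.items.foldl (fun (g : PySem.Dict String (List String)) p =>
      if p.2 ≥ pvMIN_GO then g.modify (pvNs go_term_namespace p.1) [] (fun l => l ++ [p.1]) else g) PySem.Dict.empty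
  let namespaces := PySem.List.sorted grouped.keys (fun x => x)
  let sorted_go_ids := namespaces.flatMap (fun ns => grouped.getD ns [])
  let final_go_ids := PySem.Dict.ofList (namespaces.map (fun ns => (ns, PySem.List.sorted (grouped.getD ns []) (fun x => x))))
  (final_go_ids.items, sorted_go_ids)

-- ===== PRECONDITION & SPEC =====
-- Pre_ excludes exactly the inputs where Python A raises KeyError: some GO id occurring
-- ≥ MIN_GO times has no entry in go_term_namespace (B raises there too).
def Pre_count_go_terms (seq_annos : List (List String)) (go_term_namespace : List (String × String)) : Prop :=
  ∀ g ∈ seq_annos.flatten, 50 ≤ seq_annos.flatten.count g → g ∈ go_term_namespace.map Prod.fst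
instance (seq_annos : List (List String)) (go_term_namespace : List (String × String)) : Decidable (Pre_count_go_terms seq_annos go_term_namespace) := by unfold Pre_count_go_terms; infer_instance

def pvWitness_count_go_terms : List (List String) × (List (String × String)) :=
  ([["a", "b"], ["a"]], [("a", "ns1")])

def Spec_count_go_terms (seq_annos : List (List String)) (go_term_namespace : List (String × String)) (out : (List (String × List String)) × List String) : Prop := out = count_go_terms_alt seq_annos go_term_namespace
instance (seq_annos : List (List String)) (go_term_namespace : List (String × String)) (out : (List (String × List String)) × List String) : Decidable (Spec_count_go_terms seq_annos go_term_namespace out) := by unfold Spec_count_go_terms; infer_instance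

-- ===== CLAIM (what is proved, stated in full; the proofs are below) =====
def Claim_equal_count_go_terms : Prop := ∀ (seq_annos : List (List String)) (go_term_namespace : List (String × String)), Dom_count_go_terms seq_annos go_term_namespace → Pre_count_go_terms seq_annos go_term_namespace → Spec_count_go_terms seq_annos go_term_namespace (count_go_terms seq_annos go_term_namespace)

-- ===== LEMMAS AND PROOFS =====

-- concatenation of the per-namespace groups, in the order of ks
def pvGather (key : String → String) (ks : List String) (l : List String) : List String :=
  ks.flatMap (fun k => l.filter (fun i => key i == k))

theorem pv_insertBy_append {α : Type} (before : α → α → Bool) (x : α) (as bs : List α)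
    (h : ∀ y ∈ as, before x y = false) :
    PySem.List.insertBy before x (as ++ bs) = as ++ PySem.List.insertBy before x bs := by
  induction as with
  | nil => rfl
  | cons a as ih =>
    have ha := h a (by simp)
    show PySem.List.insertBy before x (a :: (as ++ bs)) = a :: (as ++ PySem.List.insertBy before x bs)
    rw [show PySem.List.insertBy before x (a :: (as ++ bs))
        = if before x a = true then x :: a :: (as ++ bs) else a :: PySem.List.insertBy before x (as ++ bs) from rfl]
    rw [ha]
    simp only [Bool.false_eq_true, if_false]
    rw [ih (fun y hy => h y (by simp [hy]))]

theorem pv_insertBy_front {α : Type} (before : α → α → Bool) (x : α) (bs : List α)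
    (h : ∀ y ∈ bs, before x y = true) :
    PySem.List.insertBy before x bs = x :: bs := by
  cases bs with
  | nil => rfl
  | cons b bs =>
    show (if before x b = true then x :: b :: bs else b :: PySem.List.insertBy before x bs) = _
    rw [h b (by simp)]
    simp

theorem pv_insertBy_perm {α : Type} (before : α → α → Bool) (x : α) (ys : List α) :
    (PySem.List.insertBy before x ys).Perm (x :: ys) := by
  induction ys with
  | nil => exact List.Perm.refl _
  | cons y ys ih =>
    show (if before x y = true then x :: y :: ys else y :: PySem.List.insertBy before x ys).Perm _
    by_cases h : before x y = true
    · rw [if_pos h]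
    · rw [if_neg h]
      exact ((ih.cons y).trans (List.Perm.swap x y ys))

theorem pv_pairwise_insertBy (k : String) (ks : List String)
    (hp : ks.Pairwise (· < ·)) (hk : k ∉ ks) :
    (PySem.List.insertBy (fun a b => decide (a < b)) k ks).Pairwise (· < ·) := by
  induction ks with
  | nil => simp [PySem.List.insertBy]
  | cons a ks ih =>
    rcases List.pairwise_cons.mp hp with ⟨ha, hks⟩
    show (if decide (k < a) = true then k :: a :: ks else a :: PySem.List.insertBy _ k ks).Pairwise _
    by_cases h : k < a
    · rw [if_pos (by simpa using h)]
      exact List.pairwise_cons.mpr ⟨by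
        intro y hy
        rcases List.mem_cons.mp hy with hy | hy
        · exact hy ▸ h
        · exact h.trans (ha y hy), hp⟩
    · rw [if_neg (by simpa using h)]
      refine List.pairwise_cons.mpr ⟨?_, ih hks (fun hmem => hk (List.mem_cons_of_mem _ hmem))⟩
      intro y hy
      rcases (PySem.List.mem_insertBy _ _ _ _).mp hy with hy | hy
      · subst hy
        rcases lt_or_eq_of_le (not_lt.mp h) with h' | h'
        · exact h'
        · exact absurd h'.symm (fun hh => hk (by simp [hh]))
      · exact ha y hy

theorem pv_key_mem_gather (key : String → String) (ks l : List String) (y : String)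
    (hy : y ∈ pvGather key ks l) : key y ∈ ks := by
  unfold pvGather at hy
  rcases List.mem_flatMap.mp hy with ⟨k, hk, hmem⟩
  rcases List.mem_filter.mp hmem with ⟨_, hbeq⟩
  exact (eq_of_beq hbeq) ▸ hk

-- appending an element whose key names no group of ks leaves every group unchanged
theorem pv_gather_append_of_not (key : String → String) (x : String) (l ks : List String)
    (h : ∀ k ∈ ks, key x ≠ k) :
    pvGather key ks (l ++ [x]) = pvGather key ks l := by
  induction ks with
  | nil => rfl
  | cons k ks ih =>
    unfold pvGather
    simp only [List.flatMap_cons]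
    rw [List.filter_append]
    have hx : [x].filter (fun i => key i == k) = [] := by
      simp [h k (by simp)]
    rw [hx, List.append_nil]
    have := ih (fun k' hk' => h k' (by simp [hk']))
    unfold pvGather at this
    rw [this]

theorem pv_ins_gather (key : String → String) (x : String) (l : List String) :
    ∀ ks : List String, ks.Pairwise (· < ·) →
    (key x ∉ ks → l.filter (fun i => key i == key x) = []) →
    PySem.List.insertBy (fun a b => decide (key a < key b)) x (pvGather key ks l)
      = pvGather key
          (if key x ∈ ks then ks else PySem.List.insertBy (fun a b => decide (a < b)) (key x) ks)
          (l ++ [x]) := by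
  intro ks
  induction ks with
  | nil =>
    intro _ h
    simp only [List.not_mem_nil, not_false_iff, forall_true_left] at h
    simp [pvGather, PySem.List.insertBy, List.filter_append, h]
  | cons k ks ih =>
    intro hp h
    rcases List.pairwise_cons.mp hp with ⟨hk, hks⟩
    rcases lt_trichotomy (key x) k with hlt | heq | hgt
    · -- key x < k : x goes to the very front, as a new first group
      have hnotmem : key x ∉ k :: ks := by
        intro hmem
        rcases List.mem_cons.mp hmem with hmem | hmem
        · exact absurd (hmem ▸ hlt) (lt_irrefl _)
        · exact absurd (hlt.trans (hk _ hmem)) (lt_irrefl _)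
      have hfront : PySem.List.insertBy (fun a b => decide (key a < key b)) x (pvGather key (k :: ks) l)
          = x :: pvGather key (k :: ks) l := by
        apply pv_insertBy_front
        intro y hy
        have hky := pv_key_mem_gather key _ _ _ hy
        rcases List.mem_cons.mp hky with hky | hky
        · simp [hky ▸ hlt]
        · simp [hlt.trans (hk _ hky)]
      rw [hfront, if_neg hnotmem]
      have hins : PySem.List.insertBy (fun a b => decide (a < b)) (key x) (k :: ks)
          = key x :: k :: ks := by
        show (if decide (key x < k) = true then _ else _) = _
        rw [if_pos (by simpa using hlt)]
      rw [hins]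
      show _ = pvGather key (key x :: k :: ks) (l ++ [x])
      unfold pvGather
      simp only [List.flatMap_cons]
      rw [List.filter_append, h hnotmem]
      have hxx : [x].filter (fun i => key i == key x) = [x] := by simp
      rw [hxx]
      have hrest : pvGather key (k :: ks) (l ++ [x]) = pvGather key (k :: ks) l := by
        apply pv_gather_append_of_not
        intro k' hk'
        rcases List.mem_cons.mp hk' with hk' | hk'
        · exact hk' ▸ ne_of_lt hlt
        · exact ne_of_lt (hlt.trans (hk _ hk'))
      unfold pvGather at hrest
      simp only [List.flatMap_cons] at hrest
      rw [hrest]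
      rfl
    · -- key x = k : x is appended at the end of the first group
      have hnot_in_ks : key x ∉ ks := by
        intro hmem
        exact absurd (heq ▸ hk _ hmem) (lt_irrefl _)
      have step1 : PySem.List.insertBy (fun a b => decide (key a < key b)) x (pvGather key (k :: ks) l)
          = l.filter (fun i => key i == k) ++ (x :: pvGather key ks l) := by
        show PySem.List.insertBy _ x (l.filter (fun i => key i == k) ++ pvGather key ks l) = _
        rw [pv_insertBy_append]
        · congr 1
          apply pv_insertBy_front
          intro y hy
          have := pv_key_mem_gather key _ _ _ hy
          simp only [decide_eq_true_eq]
          exact heq ▸ hk _ this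
        · intro y hy
          have : key y = k := eq_of_beq (List.mem_filter.mp hy).2
          simp [this, heq]
      rw [step1, if_pos (by simp [heq])]
      show _ = pvGather key (k :: ks) (l ++ [x])
      unfold pvGather
      simp only [List.flatMap_cons]
      rw [List.filter_append]
      have hxx : [x].filter (fun i => key i == k) = [x] := by simp [heq]
      rw [hxx]
      have hrest : pvGather key ks (l ++ [x]) = pvGather key ks l :=
        pv_gather_append_of_not key x l ks (fun k' hk' => fun hh => hnot_in_ks (hh ▸ hk'))
      unfold pvGather at hrest
      rw [hrest]
      simp
    · -- k < key x : skip the first group and recurse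
      have hskip : PySem.List.insertBy (fun a b => decide (key a < key b)) x (pvGather key (k :: ks) l)
          = l.filter (fun i => key i == k) ++ PySem.List.insertBy (fun a b => decide (key a < key b)) x (pvGather key ks l) := by
        show PySem.List.insertBy _ x (l.filter (fun i => key i == k) ++ pvGather key ks l) = _
        apply pv_insertBy_append
        intro y hy
        have : key y = k := eq_of_beq (List.mem_filter.mp hy).2
        simp [this, not_lt.mpr (le_of_lt hgt)]
      have hne : key x ≠ k := ne_of_gt hgt
      have hrec := ih hks (fun hnm => h (by simp [hne, hnm]))
      rw [hskip, hrec]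
      have hfk : (l ++ [x]).filter (fun i => key i == k) = l.filter (fun i => key i == k) := by
        rw [List.filter_append]
        simp [hne]
      by_cases hmem : key x ∈ ks
      · rw [if_pos hmem, if_pos (List.mem_cons_of_mem _ hmem)]
        show _ = pvGather key (k :: ks) (l ++ [x])
        unfold pvGather
        simp only [List.flatMap_cons]
        rw [hfk]
      · rw [if_neg hmem, if_neg (by simp [hne, hmem])]
        have hins : PySem.List.insertBy (fun a b => decide (a < b)) (key x) (k :: ks)
            = k :: PySem.List.insertBy (fun a b => decide (a < b)) (key x) ks := by
          show (if decide (key x < k) = true then _ else _) = _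
          rw [if_neg (by simpa using not_lt.mpr (le_of_lt hgt))]
        rw [hins]
        show _ = pvGather key (k :: PySem.List.insertBy (fun a b => decide (a < b)) (key x) ks) (l ++ [x])
        unfold pvGather
        simp only [List.flatMap_cons]
        rw [hfk]

-- the namespaces in sorted order, as B computes them
def pvNss (key : String → String) (l : List String) : List String :=
  PySem.List.sorted (PySem.Set.ofList (l.map key)) (fun x => x)

theorem pv_sorted_eq_gather (key : String → String) (l : List String) :
    PySem.List.sorted l key = pvGather key (pvNss key l) l := by
  induction l using List.reverseRecOn with
  | nil => rfl
  | append_singleton l x ih =>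
    have hsorted : PySem.List.sorted (l ++ [x]) key
        = PySem.List.insertBy (fun a b => decide (key a < key b)) x (PySem.List.sorted l key) := by
      rw [PySem.List.sorted_eq_foldl_insertBy, PySem.List.sorted_eq_foldl_insertBy, List.foldl_append]
      rfl
    rw [hsorted, ih]
    have hpair : (pvNss key l).Pairwise (· < ·) := PySem.List.sorted_ofList_pairwise_lt _
    have hmem_iff : key x ∈ pvNss key l ↔ key x ∈ l.map key := by
      unfold pvNss
      rw [PySem.List.mem_sorted, PySem.Set.mem_ofList]
    have hfil : key x ∉ pvNss key l → l.filter (fun i => key i == key x) = [] := by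
      intro hnm
      rw [List.filter_eq_nil_iff]
      intro a ha hbeq
      exact hnm (hmem_iff.mpr (List.mem_map.mpr ⟨a, ha, eq_of_beq hbeq⟩))
    rw [pv_ins_gather key x l (pvNss key l) hpair hfil]
    congr 1
    -- the new namespace list is pvNss of l ++ [x]
    have hofl : PySem.Set.ofList ((l ++ [x]).map key)
        = PySem.Set.add (PySem.Set.ofList (l.map key)) (key x) := by
      rw [List.map_append, PySem.Set.ofList_eq_foldl, PySem.Set.ofList_eq_foldl, List.foldl_append]
      rfl
    by_cases hmem : key x ∈ pvNss key l
    · rw [if_pos hmem]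
      unfold pvNss
      rw [hofl]
      have : PySem.Set.add (PySem.Set.ofList (l.map key)) (key x) = PySem.Set.ofList (l.map key) := by
        have hx : key x ∈ PySem.Set.ofList (l.map key) :=
          (PySem.Set.mem_ofList (l.map key) (key x)).mpr (hmem_iff.mp hmem)
        simp only [PySem.Set.add]
        rw [if_pos (by simpa [List.contains_iff_mem] using hx)]
      rw [this]
    · rw [if_neg hmem]
      unfold pvNss
      rw [hofl]
      have hnx : key x ∉ PySem.Set.ofList (l.map key) := by
        rw [PySem.Set.mem_ofList]
        exact fun hh => hmem (hmem_iff.mpr hh)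
      have hadd : PySem.Set.add (PySem.Set.ofList (l.map key)) (key x)
          = PySem.Set.ofList (l.map key) ++ [key x] := by
        simp only [PySem.Set.add]
        rw [if_neg (by simpa [List.contains_iff_mem] using hnx)]
      rw [hadd]
      symm
      apply PySem.List.sorted_eq_of_perm_of_pairwise_lt
      · exact ((pv_insertBy_perm _ _ _).trans
          (((PySem.List.sorted_perm (PySem.Set.ofList (l.map key)) (fun (x : String) => x) false)).cons _)).trans
          ((List.perm_append_singleton _ _).symm)
      · exact pv_pairwise_insertBy _ _ hpair (fun hh => hnx ((PySem.List.mem_sorted _ _ _ _).mp hh))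

theorem pv_takeWhile_all_none (p : String → Bool) (as bs : List String)
    (ha : ∀ a ∈ as, p a = true) (hb : ∀ b ∈ bs, p b = false) :
    (as ++ bs).takeWhile p = as ∧ (as ++ bs).dropWhile p = bs := by
  induction as with
  | nil =>
    simp only [List.nil_append]
    cases bs with
    | nil => simp
    | cons b bs => simp [hb b (by simp)]
  | cons a as ih =>
    have hpa := ha a (by simp)
    have := ih (fun a' ha' => ha a' (by simp [ha']))
    simp only [List.cons_append, List.takeWhile_cons, List.dropWhile_cons, hpa, if_pos]
    simp [this.1, this.2]

theorem pv_groupby_gather (key : String → String) :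
    ∀ ks l : List String, ks.Pairwise (· < ·) → (∀ k ∈ ks, ∃ i ∈ l, key i = k) →
    pvGroupby key (pvGather key ks l) = ks.map (fun k => (k, l.filter (fun i => key i == k))) := by
  intro ks
  induction ks with
  | nil => intro l _ _; simp [pvGroupby, pvGather]
  | cons k ks ih =>
    intro l hp hne
    rcases List.pairwise_cons.mp hp with ⟨hk, hks⟩
    rcases hne k (by simp) with ⟨i, hil, hik⟩
    have hifil : i ∈ l.filter (fun i => key i == k) := List.mem_filter.mpr ⟨hil, by simp [hik]⟩
    rcases List.exists_cons_of_ne_nil (List.ne_nil_of_mem hifil) with ⟨y, ys, hcons⟩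
    have hyf : y ∈ l.filter (fun i => key i == k) := by
      rw [hcons]; exact List.mem_cons_self
    have hky : key y = k := eq_of_beq (List.mem_filter.mp hyf).2
    have hgather : pvGather key (k :: ks) l = y :: (ys ++ pvGather key ks l) := by
      unfold pvGather
      simp [List.flatMap_cons, hcons]
    rw [hgather]
    have hys : ∀ a ∈ ys, (fun z => key z == key y) a = true := by
      intro a ha
      have haf : a ∈ l.filter (fun i => key i == k) := by
        rw [hcons]; exact List.mem_cons_of_mem y ha
      have : key a = k := eq_of_beq (List.mem_filter.mp haf).2
      simp [this, hky]
    have hrest : ∀ b ∈ pvGather key ks l, (fun z => key z == key y) b = false := by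
      intro b hb
      have hbk := pv_key_mem_gather key _ _ _ hb
      have : k ≠ key b := ne_of_lt (hk _ hbk)
      simp [hky]
      exact fun hh => this hh.symm
    have htd := pv_takeWhile_all_none (fun z => key z == key y) ys (pvGather key ks l) hys hrest
    rw [pvGroupby, htd.1, htd.2, hky, ← hcons, ih l hks (fun k' hk' => hne k' (by simp [hk']))]
    simp

-- the filtered frequent ids, common to both ports
def pvIds (seq_annos : List (List String)) : List String :=
  (((PySem.Dict.counter seq_annos.flatten).items.filter (fun t => decide (t.2 ≥ pvMIN_GO))).map Prod.fst)

theorem pv_items_ofList_nodup {ν : Type} (ps : List (String × ν)) (h : (ps.map Prod.fst).Nodup) :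
    (PySem.Dict.ofList ps).items = ps := by
  show (PySem.Dict.empty.update ps).items = ps
  have hupd : PySem.Dict.empty.update ps = ps.foldl (fun (d : PySem.Dict String ν) p => d.insert p.1 p.2) PySem.Dict.empty := rfl
  rw [hupd]
  have := PySem.Dict.items_foldl_insert_fresh ps Prod.fst Prod.snd PySem.Dict.empty
    (fun a _ => by simp [PySem.Dict.contains_empty]) h
  simpa using this

theorem pv_nodup_ids (seq_annos : List (List String)) : (pvIds seq_annos).Nodup := by
  unfold pvIds
  have h2 : ((PySem.Dict.counter seq_annos.flatten).items.map Prod.fst).Nodup := by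
    have := PySem.Dict.nodup_keys_counter (κ := String) seq_annos.flatten
    simpa [PySem.Dict.keys] using this
  exact ((List.filter_sublist).map Prod.fst).nodup h2

theorem pv_keysA (seq_annos : List (List String)) :
    (PySem.Dict.ofList ((PySem.Dict.counter seq_annos.flatten).items.filter (fun t => decide (t.2 ≥ pvMIN_GO)))).keys
      = pvIds seq_annos := by
  show ((PySem.Dict.ofList _).items.map (fun p => p.1)) = _
  rw [pv_items_ofList_nodup _ (pv_nodup_ids seq_annos)]
  rfl

theorem pv_foldl_modify_key (gtn : List (String × String)) (l : List (String × Int)) (d : PySem.Dict String (List String)) :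
    l.foldl (fun (g : PySem.Dict String (List String)) p => g.modify (pvNs gtn p.1) [] (fun w => w ++ [p.1])) d
      = (l.map (fun p => (pvNs gtn p.1, p.1))).foldl (fun g q => g.modify q.1 [] (fun w => w ++ [q.2])) d := by
  induction l generalizing d with
  | nil => rfl
  | cons p l ih => simp only [List.foldl_cons, List.map_cons]; rw [ih]

-- B's grouped dict: its lookups and its keys
theorem pv_grouped_getD (seq_annos : List (List String)) (gtn : List (String × String)) (c : String) :
    (((PySem.Dict.counter seq_annos.flatten).items.foldl (fun (g : PySem.Dict String (List String)) p =>
        if p.2 ≥ pvMIN_GO then g.modify (pvNs gtn p.1) [] (fun l => l ++ [p.1]) else g) PySem.Dict.empty).getD c [])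
      = (pvIds seq_annos).filter (fun i => pvNs gtn i == c) := by
  rw [show ((PySem.Dict.counter seq_annos.flatten).items.foldl (fun (g : PySem.Dict String (List String)) p =>
        if p.2 ≥ pvMIN_GO then g.modify (pvNs gtn p.1) [] (fun l => l ++ [p.1]) else g) PySem.Dict.empty)
      = (((PySem.Dict.counter seq_annos.flatten).items.filter (fun t => decide (t.2 ≥ pvMIN_GO))).foldl
          (fun (g : PySem.Dict String (List String)) p => g.modify (pvNs gtn p.1) [] (fun l => l ++ [p.1])) PySem.Dict.empty)
      from PySem.List.foldl_ite_eq_foldl_filter _ _ _ _]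
  rw [pv_foldl_modify_key gtn _ PySem.Dict.empty]
  rw [PySem.Dict.getD_foldl_modify_append]
  simp only [PySem.Dict.getD_empty, List.nil_append]
  unfold pvIds
  rw [List.filter_map, List.filter_map]
  simp [Function.comp_def]

theorem pv_grouped_keys (seq_annos : List (List String)) (gtn : List (String × String)) :
    (((PySem.Dict.counter seq_annos.flatten).items.foldl (fun (g : PySem.Dict String (List String)) p =>
        if p.2 ≥ pvMIN_GO then g.modify (pvNs gtn p.1) [] (fun l => l ++ [p.1]) else g) PySem.Dict.empty).keys)
      = PySem.Set.ofList ((pvIds seq_annos).map (pvNs gtn)) := by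
  rw [show ((PySem.Dict.counter seq_annos.flatten).items.foldl (fun (g : PySem.Dict String (List String)) p =>
        if p.2 ≥ pvMIN_GO then g.modify (pvNs gtn p.1) [] (fun l => l ++ [p.1]) else g) PySem.Dict.empty)
      = (((PySem.Dict.counter seq_annos.flatten).items.filter (fun t => decide (t.2 ≥ pvMIN_GO))).foldl
          (fun (g : PySem.Dict String (List String)) p => g.modify (pvNs gtn p.1) [] (fun l => l ++ [p.1])) PySem.Dict.empty)
      from PySem.List.foldl_ite_eq_foldl_filter _ _ _ _]
  rw [PySem.Dict.keys_foldl_modify_key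
    ((PySem.Dict.counter seq_annos.flatten).items.filter (fun t => decide (t.2 ≥ pvMIN_GO)))
    (fun p => pvNs gtn p.1) ([] : List String) (fun _ p l => l ++ [p.1]) PySem.Dict.empty]
  unfold pvIds
  rw [List.map_map]
  rfl

theorem count_go_terms_eq (seq_annos : List (List String)) (gtn : List (String × String)) :
    count_go_terms seq_annos gtn = count_go_terms_alt seq_annos gtn := by
  simp only [count_go_terms, count_go_terms_alt]
  have hcounter : seq_annos.foldl (fun d anno => anno.foldl (fun (d : PySem.Dict String Int) x => d.insert x (d.getD x 0 + 1)) d) PySem.Dict.empty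
      = PySem.Dict.counter seq_annos.flatten := by
    rw [← PySem.Dict.foldl_insert_getD_add_one_eq_counter, List.foldl_flatten]
  rw [hcounter, pv_keysA]
  rw [pv_grouped_keys seq_annos gtn]
  have hsorted : PySem.List.sorted (pvIds seq_annos) (fun v => pvNs gtn v)
      = pvGather (fun v => pvNs gtn v) (pvNss (fun v => pvNs gtn v) (pvIds seq_annos)) (pvIds seq_annos) :=
    pv_sorted_eq_gather _ _
  have hnss : PySem.List.sorted (PySem.Set.ofList ((pvIds seq_annos).map (pvNs gtn))) (fun x => x)
      = pvNss (fun v => pvNs gtn v) (pvIds seq_annos) := rfl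
  rw [hnss, hsorted]
  have hpair : (pvNss (fun v => pvNs gtn v) (pvIds seq_annos)).Pairwise (· < ·) :=
    PySem.List.sorted_ofList_pairwise_lt _
  have hne : ∀ k ∈ pvNss (fun v => pvNs gtn v) (pvIds seq_annos), ∃ i ∈ pvIds seq_annos, pvNs gtn i = k := by
    intro k hkmem
    have : k ∈ (pvIds seq_annos).map (pvNs gtn) := by
      have := (PySem.List.mem_sorted _ _ _ _).mp hkmem
      rwa [PySem.Set.mem_ofList] at this
    rcases List.mem_map.mp this with ⟨i, hi, hik⟩
    exact ⟨i, hi, hik⟩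
  have hgroup : pvGroupby (fun v => pvNs gtn v)
        (pvGather (fun v => pvNs gtn v) (pvNss (fun v => pvNs gtn v) (pvIds seq_annos)) (pvIds seq_annos))
      = (pvNss (fun v => pvNs gtn v) (pvIds seq_annos)).map
          (fun k => (k, (pvIds seq_annos).filter (fun i => pvNs gtn i == k))) :=
    pv_groupby_gather _ _ _ hpair hne
  rw [hgroup]
  refine congrArg₂ Prod.mk ?_ ?_
  · -- the final dicts agree
    apply congrArg PySem.Dict.items
    apply congrArg PySem.Dict.ofList
    rw [List.map_map]
    apply List.map_congr_left
    intro ns _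
    simp only [Function.comp_def]
    rw [pv_grouped_getD seq_annos gtn ns]
  · -- the two sorted id lists agree
    show pvGather _ _ _ = _
    unfold pvGather
    apply List.flatMap_congr
    intro ns _
    rw [pv_grouped_getD seq_annos gtn ns]

-- ===== VERDICT (by name: the statement is the Claim_ definition above) =====
theorem count_go_terms_spec : Claim_equal_count_go_terms := by
  intro seq_annos gtn _ _
  unfold Spec_count_go_terms
  exact count_go_terms_eq seq_annos gtn
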